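-- pv_equiv track=rewrite | github.com/Tempura-Roll/RepasoProgra | solution-2c84c52a-a1e0-4545-b32e-6d733b90301e.py | pregunta_1
-- ===== SOURCE A (Python) =====
-- def pregunta_1(lista:list[int])->dict:
--     """
--     Parametros:
--         lista  (list[int]) :  lista de numeros enteros
--     Retorna:
--         dict : el diccionario de divisores y los numeros divisibles
--     """
--     resultado = {}
--     for num in lista:
--         for d in range(2,num+1):
--             if num % d == 0:
--                 if d not in resultado:
--                     resultado[d] = []
--                 resultado[d].append(num)
--     return resultado
-- ===== SOURCE B (Python) =====
-- def pregunta_1(lista: list[int]) -> dict: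
--     resultado = {}
--     for num in lista:
--         if num >= 2:
--             divs = set()
--             d = 1
--             while d * d <= num:
--                 if num % d == 0:
--                     divs.add(d)
--                     divs.add(num // d)
--                 d += 1
--             for d in sorted(divs):
--                 if d >= 2:
--                     resultado.setdefault(d, []).append(num)
--     return resultado
-- ===== Notes on version B (the rewrite author's own statement) =====
-- stated objective: faster
-- what changed: Per number, B enumerates divisor pairs (d, num//d) only up to sqrt(num) into a set and sorts them, instead of A's trial scan over every d in range(2, num+1).
import Mathlib
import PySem

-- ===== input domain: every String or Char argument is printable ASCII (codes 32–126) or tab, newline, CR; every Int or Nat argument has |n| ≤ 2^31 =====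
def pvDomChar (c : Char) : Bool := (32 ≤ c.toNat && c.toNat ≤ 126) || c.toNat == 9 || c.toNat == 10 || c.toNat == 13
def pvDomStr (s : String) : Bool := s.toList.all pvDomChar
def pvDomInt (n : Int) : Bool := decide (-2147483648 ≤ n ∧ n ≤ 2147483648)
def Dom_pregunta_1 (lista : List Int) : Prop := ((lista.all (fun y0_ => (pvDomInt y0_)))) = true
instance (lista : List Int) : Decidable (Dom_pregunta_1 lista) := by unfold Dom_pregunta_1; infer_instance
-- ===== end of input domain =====

-- B replaces A's trial scan over every d in range(2, num+1) by enumerating divisor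
-- pairs (d, num//d) up to sqrt(num) into a set and sorting them (asymptotically faster).

-- ===== PORT A =====
def pregunta_1 (lista : List Int) : List (Int × List Int) :=
  (lista.foldl (fun resultado num =>
      (PySem.List.pyRange 2 (num + 1) 1).foldl (fun resultado d =>
          if PySem.Int.mod num d = 0 then
            (if resultado.contains d then resultado else resultado.insert d ([] : List Int)).modify
              d [] (fun l => l ++ [num])
          else resultado)
        resultado)
    (PySem.Dict.empty : PySem.Dict Int (List Int))).items

-- ===== PORT B =====
-- the 'while d*d <= num' loop of Source B; d only takes the values 1,2,3,… so it is carried as a Nat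
def pvCollect (num : Int) (d : Nat) (divs : PySem.Set Int) : PySem.Set Int :=
  if _h : (d : Int) * d ≤ num then
    pvCollect num (d + 1)
      (if PySem.Int.mod num (d : Int) = 0 then
        PySem.Set.add (PySem.Set.add divs (d : Int)) (PySem.Int.floordiv num (d : Int))
      else divs)
  else divs
termination_by num.toNat + 1 - d
decreasing_by
  have hdd : (d : Nat) ≤ d * d := by
    cases d with
    | zero => simp
    | succ n => exact Nat.le_mul_of_pos_left _ (Nat.succ_pos n)
  have h1 : ((d * d : Nat) : Int) ≤ num := by exact_mod_cast _h
  clear _h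
  omega

def pregunta_1_alt (lista : List Int) : List (Int × List Int) :=
  (lista.foldl (fun resultado num =>
      if 2 ≤ num then
        (PySem.List.sorted (pvCollect num 1 PySem.Set.empty) (fun x => x) false).foldl
          (fun resultado d =>
            if 2 ≤ d then
              (resultado.setdefault d ([] : List Int)).modify d [] (fun l => l ++ [num])
            else resultado)
          resultado
      else resultado)
    (PySem.Dict.empty : PySem.Dict Int (List Int))).items

-- ===== PRECONDITION & SPEC =====
def Spec_pregunta_1 (lista : List Int) (out : List (Int × List Int)) : Prop := out = pregunta_1_alt lista
instance (lista : List Int) (out : List (Int × List Int)) : Decidable (Spec_pregunta_1 lista out) := by unfold Spec_pregunta_1; infer_instance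

-- ===== CLAIM (what is proved, stated in full; the proofs are below) =====
def Claim_equal_pregunta_1 : Prop := ∀ (lista : List Int), Dom_pregunta_1 lista → Spec_pregunta_1 lista (pregunta_1 lista)

-- ===== LEMMAS AND PROOFS =====

theorem mem_pvCollect (num : Int) (d : Nat) (divs : PySem.Set Int) (x : Int) :
    x ∈ pvCollect num d divs ↔
      x ∈ divs ∨ ∃ k : Nat, d ≤ k ∧ (k : Int) * k ≤ num ∧ (k : Int) ∣ num ∧
        (x = (k : Int) ∨ x = PySem.Int.floordiv num (k : Int)) := by
  fun_induction pvCollect num d divs with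
  | case1 d divs h ih =>
      simp only [dite_eq_ite] at ih
      rw [ih]
      by_cases hm : PySem.Int.mod num (d : Int) = 0
      · simp only [hm, if_pos, PySem.Set.mem_add]
        have hdvd : (d : Int) ∣ num := (PySem.Int.mod_eq_zero_iff_dvd num d).mp hm
        constructor
        · rintro (((hx | hx) | hx) | ⟨k, hk, h2, h3, h4⟩)
          · exact Or.inl hx
          · exact Or.inr ⟨d, le_refl d, h, hdvd, Or.inl hx⟩
          · exact Or.inr ⟨d, le_refl d, h, hdvd, Or.inr hx⟩
          · exact Or.inr ⟨k, Nat.le_of_succ_le hk, h2, h3, h4⟩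
        · rintro (hx | ⟨k, hk, h2, h3, h4⟩)
          · exact Or.inl (Or.inl (Or.inl hx))
          · rcases Nat.eq_or_lt_of_le hk with hkd | hkd
            · subst hkd
              rcases h4 with h4 | h4
              · exact Or.inl (Or.inl (Or.inr h4))
              · exact Or.inl (Or.inr h4)
            · exact Or.inr ⟨k, hkd, h2, h3, h4⟩
      · simp only [hm, if_false]
        constructor
        · rintro (hx | ⟨k, hk, h2, h3, h4⟩)
          · exact Or.inl hx
          · exact Or.inr ⟨k, Nat.le_of_succ_le hk, h2, h3, h4⟩
        · rintro (hx | ⟨k, hk, h2, h3, h4⟩)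
          · exact Or.inl hx
          · rcases Nat.eq_or_lt_of_le hk with hkd | hkd
            · subst hkd
              exact absurd ((PySem.Int.mod_eq_zero_iff_dvd num _).mpr h3) hm
            · exact Or.inr ⟨k, hkd, h2, h3, h4⟩
  | case2 d divs h =>
      simp only [iff_self_or]
      rintro ⟨k, hk, h2, h3, h4⟩
      have : (d : Int) * d ≤ (k : Int) * k := by
        have := Nat.mul_le_mul hk hk
        exact_mod_cast this
      exact absurd (le_trans this h2) h

theorem nodup_pvCollect (num : Int) (d : Nat) (divs : PySem.Set Int)
    (hnd : List.Nodup divs) : List.Nodup (pvCollect num d divs) := by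
  fun_induction pvCollect num d divs with
  | case1 d divs h ih =>
      apply ih
      split
      · exact PySem.Set.nodup_add _ _ (PySem.Set.nodup_add _ _ hnd)
      · exact hnd
  | case2 d divs h => exact hnd

theorem mem_pvCollect_one (num : Int) (hnum : 2 ≤ num) (x : Int) :
    x ∈ pvCollect num 1 PySem.Set.empty ↔ 1 ≤ x ∧ x ≤ num ∧ x ∣ num := by
  rw [mem_pvCollect]
  constructor
  · rintro (hx | ⟨k, hk1, hk2, hk3, hx | hx⟩)
    · simp [PySem.Set.empty] at hx
    · subst hx
      have hk1' : (1 : Int) ≤ (k : Int) := by exact_mod_cast hk1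
      refine ⟨hk1', le_trans ?_ hk2, hk3⟩
      nlinarith
    · obtain ⟨c, hc⟩ := hk3
      have hk0 : (0 : Int) < (k : Int) := by exact_mod_cast hk1
      have hfd : PySem.Int.floordiv num (k : Int) = num / (k : Int) :=
        PySem.Int.floordiv_eq_ediv_of_pos hk0
      subst hx
      rw [hfd, hc, Int.mul_ediv_cancel_left _ (ne_of_gt hk0)]
      have hc1 : (1 : Int) ≤ c := by nlinarith
      refine ⟨hc1, ?_, ⟨(k : Int), by ring⟩⟩
      nlinarith
  · rintro ⟨hx1, hx2, c, hc⟩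
    have hx0 : (0 : Int) < x := by omega
    have hc1 : (1 : Int) ≤ c := by nlinarith
    right
    by_cases hsq : x * x ≤ num
    · have hxt : ((x.toNat : Int)) = x := Int.toNat_of_nonneg (le_of_lt hx0)
      refine ⟨x.toNat, by omega, by rw [hxt]; exact hsq, by rw [hxt]; exact ⟨c, hc⟩, Or.inl (by omega)⟩
    · have hcx : c ≤ x := by nlinarith
      have hcc : c * c ≤ num := by nlinarith
      refine ⟨c.toNat, ?_, ?_, ?_, Or.inr ?_⟩
      · omega
      · rw [Int.toNat_of_nonneg (by omega)]; exact hcc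
      · rw [Int.toNat_of_nonneg (by omega)]; exact ⟨x, by rw [hc]; ring⟩
      · rw [Int.toNat_of_nonneg (by omega),
          PySem.Int.floordiv_eq_ediv_of_pos (by omega : (0:Int) < c), hc,
          Int.mul_ediv_cancel _ (by omega : c ≠ 0)]

theorem pvFoldlIte {α β : Type} (p : α → Prop) [DecidablePred p] (f : β → α → β)
    (l : List α) (init : β) :
    l.foldl (fun acc x => if p x then f acc x else acc) init
      = (l.filter (fun x => decide (p x))).foldl f init := by
  induction l generalizing init with
  | nil => rfl
  | cons a t ih => by_cases h : p a <;> simp [h, ih]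

theorem pvDivlistEq (num : Int) (hnum : 2 ≤ num) :
    (PySem.List.pyRange 2 (num + 1) 1).filter (fun d => decide (PySem.Int.mod num d = 0))
      = (PySem.List.sorted (pvCollect num 1 PySem.Set.empty) (fun x => x) false).filter
          (fun d => decide (2 ≤ d)) := by
  have hL : ((PySem.List.pyRange 2 (num + 1) 1).filter
      (fun d => decide (PySem.Int.mod num d = 0))).Pairwise (· < ·) :=
    (PySem.List.pairwise_lt_pyRange_one 2 (num + 1)).filter _
  have hSnd : (pvCollect num 1 PySem.Set.empty).Nodup :=
    nodup_pvCollect num 1 PySem.Set.empty List.nodup_nil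
  have hsortnd : (PySem.List.sorted (pvCollect num 1 PySem.Set.empty) (fun x => x) false).Nodup :=
    ((PySem.List.sorted_perm (pvCollect num 1 PySem.Set.empty) (fun x => x) false).nodup_iff).mpr hSnd
  have hsortle := PySem.List.sorted_pairwise (pvCollect num 1 PySem.Set.empty) (fun x => x)
  have hsortlt : (PySem.List.sorted (pvCollect num 1 PySem.Set.empty) (fun x => x) false).Pairwise (· < ·) :=
    (hsortle.and hsortnd).imp (fun h => lt_of_le_of_ne h.1 h.2)
  have hR : ((PySem.List.sorted (pvCollect num 1 PySem.Set.empty) (fun x => x) false).filter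
      (fun d => decide (2 ≤ d))).Pairwise (· < ·) := hsortlt.filter _
  have hmem : ∀ x : Int,
      x ∈ (PySem.List.pyRange 2 (num + 1) 1).filter (fun d => decide (PySem.Int.mod num d = 0)) ↔
      x ∈ (PySem.List.sorted (pvCollect num 1 PySem.Set.empty) (fun x => x) false).filter
        (fun d => decide (2 ≤ d)) := by
    intro x
    simp only [List.mem_filter, PySem.List.mem_pyRange_one, PySem.List.mem_sorted,
      mem_pvCollect_one num hnum, decide_eq_true_eq, PySem.Int.mod_eq_zero_iff_dvd]
    constructor
    · rintro ⟨⟨h1, h2⟩, h3⟩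
      exact ⟨⟨by omega, by omega, h3⟩, h1⟩
    · rintro ⟨⟨h1, h2, h3⟩, h4⟩
      exact ⟨⟨h4, by omega⟩, h3⟩
  exact List.Perm.eq_of_pairwise
    (fun a b _ _ hab hba => absurd hba (lt_asymm hab)) hL hR
    ((List.perm_ext_iff_of_nodup (hL.imp ne_of_lt) (hR.imp ne_of_lt)).mpr hmem)

theorem pvSetdefaultEq (resultado : PySem.Dict Int (List Int)) (d : Int) (v : List Int) :
    resultado.setdefault d v
      = if resultado.contains d then resultado else resultado.insert d v := by
  by_cases h : resultado.contains d
  · simp [PySem.Dict.setdefault, h]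
  · have h' : resultado.contains d = false := by simp_all
    simp only [PySem.Dict.setdefault, h', Bool.false_eq_true, if_false]
    exact PySem.Dict.ext (by simp [PySem.Dict.items_insert_of_not_contains resultado v h'])

theorem pvStepEq (resultado : PySem.Dict Int (List Int)) (num : Int) :
    (PySem.List.pyRange 2 (num + 1) 1).foldl (fun resultado d =>
        if PySem.Int.mod num d = 0 then
          (if resultado.contains d then resultado else resultado.insert d ([] : List Int)).modify
            d [] (fun l => l ++ [num])
        else resultado) resultado
      = if 2 ≤ num then
          (PySem.List.sorted (pvCollect num 1 PySem.Set.empty) (fun x => x) false).foldl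
            (fun resultado d =>
              if 2 ≤ d then
                (resultado.setdefault d ([] : List Int)).modify d [] (fun l => l ++ [num])
              else resultado) resultado
        else resultado := by
  by_cases hnum : 2 ≤ num
  · rw [if_pos hnum,
      pvFoldlIte (fun d => PySem.Int.mod num d = 0)
        (fun resultado d =>
          (if resultado.contains d then resultado else resultado.insert d ([] : List Int)).modify
            d [] (fun l => l ++ [num])) _ resultado,
      pvFoldlIte (fun d => (2 : Int) ≤ d)
        (fun resultado d =>
          (resultado.setdefault d ([] : List Int)).modify d [] (fun l => l ++ [num])) _ resultado,
      ← pvDivlistEq num hnum]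
    congr 1
    funext resultado d
    rw [pvSetdefaultEq]
  · rw [if_neg hnum, PySem.List.pyRange_one_eq_nil (by omega)]
    rfl

-- ===== VERDICT (by name: the statement is the Claim_ definition above) =====
theorem pregunta_1_spec : Claim_equal_pregunta_1 := by
  intro lista _
  unfold Spec_pregunta_1 pregunta_1 pregunta_1_alt
  congr 1
  congr 1
  funext resultado num
  exact pvStepEq resultado num
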